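-- pv_equiv track=rewrite | github.com/LorseKudos/CTF | HSCTF 8/rev/warmup-rev/solve.py | cool_rev
-- ===== SOURCE A (Python) =====
-- def cool_rev(t):
--     s = ""
--     for i in range(len(t)):
--         if i % 2 == 0:
--             s += chr(ord(t[i]) - 3 * (i//2))
--         else:
--             s += t[i]
--     return s
-- ===== SOURCE B (Python) =====
-- def cool_rev(t):
--     evens = [chr(ord(c) - 3 * k) for k, c in enumerate(t[::2])]
--     odds = t[1::2]
--     merged = [c for pair in zip(evens, odds) for c in pair]
--     merged += evens[len(odds):]
--     return "".join(merged)
-- ===== Notes on version B (the rewrite author's own statement) =====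
-- stated objective: alternative
-- what changed: Instead of one per-character scan with a parity branch, B slices the string into its even and odd subsequences, shifts the even subsequence by position, interleaves the two lists with zip and appends the leftover even tail.
import Mathlib
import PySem

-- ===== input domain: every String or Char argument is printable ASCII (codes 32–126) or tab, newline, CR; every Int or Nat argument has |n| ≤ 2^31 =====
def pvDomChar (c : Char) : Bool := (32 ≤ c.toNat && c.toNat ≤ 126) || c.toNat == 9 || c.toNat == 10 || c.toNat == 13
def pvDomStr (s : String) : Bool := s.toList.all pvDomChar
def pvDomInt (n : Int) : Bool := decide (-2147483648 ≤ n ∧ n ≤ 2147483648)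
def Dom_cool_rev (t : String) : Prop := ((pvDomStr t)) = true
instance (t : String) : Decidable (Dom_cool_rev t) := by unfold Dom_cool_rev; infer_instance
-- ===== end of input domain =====

-- B slices the string into its even and odd subsequences, shifts the evens by position,
-- and interleaves them back with zip; A does one per-character scan with a parity branch.

-- chr(ord(c) - 3*k); exact whenever 0 ≤ ord(c) - 3*k (Pre_ guarantees this; Python's chr raises ValueError on a negative argument)
def pyShift (c : Char) (k : Int) : Char := Char.ofNat (((c.toNat : Int) - 3 * k).toNat)

-- ===== PORT A =====
def cool_rev (t : String) : String :=
  String.ofList ((List.range t.toList.length).foldl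
    (fun s i =>
      if i % 2 == 0 then s ++ [pyShift t.toList[i]! ((i / 2 : Nat) : Int)]
      else s ++ [t.toList[i]!]) [])

-- ===== PORT B =====
def cool_rev_alt (t : String) : String :=
  let l := t.toList
  -- t[::2] / t[1::2]; the step literal 2 is nonzero, so slice? is always `some`
  let evens := (PySem.List.enumerate ((PySem.List.slice? l none none 2).getD []) 0).map
      (fun p => pyShift p.2 p.1)
  let odds := (PySem.List.slice? l (some 1) none 2).getD []
  let merged := (evens.zip odds).flatMap (fun p => [p.1, p.2])
  String.ofList (merged ++ evens.drop odds.length)   -- evens[len(odds):]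

-- ===== PRECONDITION & SPEC =====
-- Pre_ excludes exactly the inputs on which Python A raises ValueError in chr
-- (ord(t[i]) - 3*(i//2) < 0 at some even index i); B raises there too.
def Pre_cool_rev (t : String) : Prop :=
  ∀ i : Nat, i < t.toList.length → i % 2 = 0 → 3 * (i / 2) ≤ (t.toList[i]!).toNat
instance (t : String) : Decidable (Pre_cool_rev t) := by unfold Pre_cool_rev; infer_instance

def pvWitness_cool_rev : String := "Hello!"

def Spec_cool_rev (t : String) (out : String) : Prop := out = cool_rev_alt t
instance (t : String) (out : String) : Decidable (Spec_cool_rev t out) := by unfold Spec_cool_rev; infer_instance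

-- ===== CLAIM (what is proved, stated in full; the proofs are below) =====
def Claim_equal_cool_rev : Prop := ∀ (t : String), Dom_cool_rev t → Pre_cool_rev t → Spec_cool_rev t (cool_rev t)

-- ===== LEMMAS AND PROOFS =====

-- canonical pair-at-a-time result both ports are reduced to
def pairs : List Char → Nat → List Char
  | [], _ => []
  | [a], k => [pyShift a (k : Int)]
  | a :: b :: r, k => pyShift a (k : Int) :: b :: pairs r (k + 1)

-- the even-index subsequence
def evens : List Char → List Char
  | [] => []
  | [a] => [a]
  | a :: _ :: r => a :: evens r

lemma evens_cons_tail (b : Char) (r : List Char) : evens (b :: r) = b :: evens r.tail := by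
  cases r <;> rfl

-- what slice? with step 2 computes, written with plain indices
def evensFM (l : List Char) : List Char :=
  List.filterMap (fun k => l[2 * k]?) (List.range ((l.length + 1) / 2))

lemma evensFM_eq : ∀ l : List Char, evensFM l = evens l
  | [] => by simp [evensFM, evens]
  | [a] => by simp [evensFM, evens]
  | a :: b :: r => by
    have hc : ((a :: b :: r).length + 1) / 2 = (r.length + 1) / 2 + 1 := by
      simp; omega
    have hf : (fun k => (a :: b :: r)[2 * (k + 1)]?) = (fun k => r[2 * k]?) := by
      funext k
      have : 2 * (k + 1) = (2 * k) + 1 + 1 := by omega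
      rw [this]
      simp
    rw [evensFM, hc, List.range_succ_eq_map, List.filterMap_cons, List.filterMap_map]
    have h0 : (fun k => (a :: b :: r)[2 * k]?) 0 = some a := by simp
    simp only [Nat.succ_eq_add_one, Function.comp_def]
    rw [show (fun k => (a :: b :: r)[2 * (k + 1)]?) = (fun k => r[2 * k]?) from hf] at *
    simp [evens, ← evensFM_eq r, evensFM]

lemma sliceE (l : List Char) : PySem.List.slice? l none none 2 = some (evensFM l) := by
  cases l with
  | nil => rfl
  | cons a r =>
    simp only [PySem.List.slice?, PySem.List.sliceIndices]
    norm_num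
    have hcnt : ((((r.length : Int)) + 1 + 2 - 1) / 2).toNat = ((a :: r).length + 1) / 2 := by
      simp; omega
    rw [hcnt]
    unfold evensFM
    apply List.filterMap_congr
    intro k _
    congr 1

lemma sliceO (l : List Char) : PySem.List.slice? l (some 1) none 2 = some (evensFM l.tail) := by
  cases l with
  | nil => rfl
  | cons a r =>
    simp only [PySem.List.slice?, PySem.List.sliceIndices]
    norm_num
    by_cases hr : 0 < r.length
    · rw [if_pos hr]
      have hcnt : (((r.length : Int) + 2 - 1) / 2).toNat = (r.length + 1) / 2 := by
        omega
      rw [hcnt]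
      unfold evensFM
      apply List.filterMap_congr
      intro k _
      have h2 : ((1 : Int) + 2 * (k : Int)).toNat = 2 * k + 1 := by omega
      rw [h2]
      simp
    · have hr0 : r = [] := by cases r; rfl; simp at hr
      subst hr0
      simp [evensFM]

lemma mainB : ∀ (l : List Char) (k : Nat),
    ((((PySem.List.enumerate (evens l) (k : Int)).map (fun p => pyShift p.2 p.1)).zip
        (evens l.tail)).flatMap (fun p => [p.1, p.2]))
      ++ ((PySem.List.enumerate (evens l) (k : Int)).map (fun p => pyShift p.2 p.1)).drop
          (evens l.tail).length
    = pairs l k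
  | [], k => by simp [evens, pairs]
  | [a], k => by simp [evens, pairs, PySem.List.enumerate]
  | a :: b :: r, k => by
    have hcast : (k : Int) + 1 = ((k + 1 : Nat) : Int) := by push_cast; ring
    have ih := mainB r (k + 1)
    simp only [evens, List.tail_cons, evens_cons_tail, PySem.List.enumerate_cons, List.map_cons,
      List.zip_cons_cons, List.flatMap_cons, List.length_cons, List.drop_succ_cons, pairs]
    rw [hcast, List.append_assoc, ih]
    simp

lemma foldA : ∀ (l : List Char) (k : Nat) (acc : List Char),
    (List.range l.length).foldl
      (fun s j => if j % 2 == 0 then s ++ [pyShift l[j]! ((j / 2 + k : Nat) : Int)]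
                  else s ++ [l[j]!]) acc
      = acc ++ pairs l k
  | [], k, acc => by simp [pairs]
  | [a], k, acc => by
    simp [pairs, List.range_succ]
  | a :: b :: r, k, acc => by
    have hlen : (a :: b :: r).length = r.length + 1 + 1 := by simp
    rw [hlen, List.range_succ_eq_map, List.range_succ_eq_map, List.map_cons, List.map_map,
      List.foldl_cons, List.foldl_cons, List.foldl_map]
    have h0 : (if (0 : Nat) % 2 == 0 then acc ++ [pyShift (a :: b :: r)[(0:Nat)]! ((0 / 2 + k : Nat) : Int)]
        else acc ++ [(a :: b :: r)[(0:Nat)]!]) = acc ++ [pyShift a (k : Int)] := by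
      simp
    have h1 : ∀ s : List Char, (if Nat.succ 0 % 2 == 0 then s ++ [pyShift (a :: b :: r)[Nat.succ 0]! ((Nat.succ 0 / 2 + k : Nat) : Int)]
        else s ++ [(a :: b :: r)[Nat.succ 0]!]) = s ++ [b] := by
      intro s; simp
    have hf : (fun (s : List Char) (j : Nat) =>
        if Nat.succ (Nat.succ j) % 2 == 0 then s ++ [pyShift (a :: b :: r)[Nat.succ (Nat.succ j)]! ((Nat.succ (Nat.succ j) / 2 + k : Nat) : Int)]
        else s ++ [(a :: b :: r)[Nat.succ (Nat.succ j)]!])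
        = (fun (s : List Char) (j : Nat) =>
        if j % 2 == 0 then s ++ [pyShift r[j]! ((j / 2 + (k + 1) : Nat) : Int)]
        else s ++ [r[j]!]) := by
      funext s j
      have hm : Nat.succ (Nat.succ j) % 2 = j % 2 := by omega
      simp only [Nat.succ_eq_add_one, List.getElem!_eq_getElem?_getD, List.getElem?_cons_succ]
      rw [hm, show j + 1 + 1 = j + 2 from rfl, show (j + 2) / 2 + k = j / 2 + (k + 1) by omega]
    rw [h0, h1]
    simp only [Function.comp_apply]
    rw [hf, show acc ++ [pyShift a (k : Int)] ++ [b] = acc ++ [pyShift a (k : Int), b] by simp,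
      foldA r (k + 1) (acc ++ [pyShift a (k : Int), b])]
    simp [pairs]

-- ===== VERDICT (by name: the statement is the Claim_ definition above) =====
theorem cool_rev_spec : Claim_equal_cool_rev := by
  intro t _ _
  unfold Spec_cool_rev cool_rev cool_rev_alt
  simp only [sliceE, sliceO, Option.getD_some, evensFM_eq]
  have hB := mainB t.toList 0
  simp only [Nat.cast_zero] at hB
  rw [hB]
  have hA := foldA t.toList 0 []
  simp only [Nat.add_zero] at hA
  rw [hA]
  simp
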